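-- pv_equiv track=rewrite | github.com/raviabhiram/Problem-Solving | domino_solitaire.py | solve
-- ===== SOURCE A (Python) =====
-- def solve(values):
-- 	result = [0] * len(values[0])
-- 	result[0] = abs(values[0][0] - values[1][0])
-- 	vertical = abs(values[0][0] - values[1][0]) + abs(values[0][1] - values[1][1])
-- 	horizontal = abs(values[0][0] - values[0][1]) + abs(values[1][0] - values[1][1])
-- 	result[1] = max(vertical, horizontal)
-- 	for i in range(2, len(values[0])):
-- 		vertical = abs((values[0][i] - values[1][i])) + result[i - 1]
-- 		horizontal = abs(values[0][i] - values[0][i - 1]) + abs(values[1][i] - values[1][i - 1]) + result[i - 2]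
-- 		result[i] = max(vertical, horizontal)
-- 	return result[-1]
-- ===== SOURCE B (Python) =====
-- def solve(values):
--     top, bot = values[0], values[1]
--     n = len(top)
--     memo = {}
--
--     def best(i):
--         if i in memo:
--             return memo[i]
--         if i == 0:
--             r = abs(top[0] - bot[0])
--         elif i == 1:
--             r = max(abs(top[0] - bot[0]) + abs(top[1] - bot[1]),
--                     abs(top[0] - top[1]) + abs(bot[0] - bot[1]))
--         else:
--             r = max(abs(top[i] - bot[i]) + best(i - 1),
--                     abs(top[i] - top[i - 1]) + abs(bot[i] - bot[i - 1]) + best(i - 2))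
--         memo[i] = r
--         return r
--
--     return best(n - 1)
-- ===== Notes on version B (the rewrite author's own statement) =====
-- stated objective: alternative
-- what changed: Replaces A's bottom-up array fill (result list indexed 0..n-1) with a memoized top-down recursion best(i) over the column index, with no result array.
import Mathlib
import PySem

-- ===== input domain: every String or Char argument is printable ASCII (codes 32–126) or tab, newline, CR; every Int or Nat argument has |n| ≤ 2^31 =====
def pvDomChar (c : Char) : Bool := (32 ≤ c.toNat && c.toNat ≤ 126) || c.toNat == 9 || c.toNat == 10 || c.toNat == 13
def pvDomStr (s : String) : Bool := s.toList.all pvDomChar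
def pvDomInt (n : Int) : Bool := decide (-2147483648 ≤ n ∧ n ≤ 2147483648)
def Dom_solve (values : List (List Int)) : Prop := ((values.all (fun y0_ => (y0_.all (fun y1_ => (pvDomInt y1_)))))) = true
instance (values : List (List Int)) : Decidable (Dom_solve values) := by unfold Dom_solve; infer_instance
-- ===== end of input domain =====

-- B replaces A's bottom-up array fill with a top-down recursion over the column index (memoized in Python); return values agree on all inputs A accepts.


-- ===== PORT A =====
-- loop body of 'for i in range(2, len(values[0]))'; the loop index from pyRange is ≥ 2, so i.toNat is exact
def stepA (row0 row1 : List Int) (res : List Int) (i : Int) : List Int :=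
  let j := i.toNat
  let vertical := |row0.getD j 0 - row1.getD j 0| + res.getD (j - 1) 0
  let horizontal := |row0.getD j 0 - row0.getD (j - 1) 0| + |row1.getD j 0 - row1.getD (j - 1) 0| + res.getD (j - 2) 0
  res.set j (max vertical horizontal)

-- element accesses are getD (in-range under Pre_solve, so exact there; out-of-range access raises in Python and is excluded by Pre_solve)
def solve (values : List (List Int)) : Int :=
  let row0 := values.getD 0 []
  let row1 := values.getD 1 []
  let n := row0.length
  let result := (List.replicate n (0:Int)).set 0 (|row0.getD 0 0 - row1.getD 0 0|)
  let vertical := |row0.getD 0 0 - row1.getD 0 0| + |row0.getD 1 0 - row1.getD 1 0|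
  let horizontal := |row0.getD 0 0 - row0.getD 1 0| + |row1.getD 0 0 - row1.getD 1 0|
  let result := result.set 1 (max vertical horizontal)
  let result := (PySem.List.pyRange 2 (n : Int) 1).foldl (stepA row0 row1) result
  result.getD (n - 1) 0   -- result[-1]; n ≥ 1 under Pre_solve

-- ===== PORT B =====
def bestB (row0 row1 : List Int) : Nat → Int
  | 0 => |row0.getD 0 0 - row1.getD 0 0|
  | 1 => max (|row0.getD 0 0 - row1.getD 0 0| + |row0.getD 1 0 - row1.getD 1 0|)
             (|row0.getD 0 0 - row0.getD 1 0| + |row1.getD 0 0 - row1.getD 1 0|)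
  | (k+2) => max (|row0.getD (k+2) 0 - row1.getD (k+2) 0| + bestB row0 row1 (k+1))
                 (|row0.getD (k+2) 0 - row0.getD (k+1) 0| + |row1.getD (k+2) 0 - row1.getD (k+1) 0| + bestB row0 row1 k)

-- Source B memoizes best with a dict; the recursion computes the same recurrence, so the memo is dropped here (pure recursion)
def solve_alt (values : List (List Int)) : Int :=
  let row0 := values.getD 0 []
  let row1 := values.getD 1 []
  bestB row0 row1 (row0.length - 1)

-- ===== PRECONDITION & SPEC =====
-- Pre_solve: exactly where A returns — at least two rows, first row has ≥ 2 columns, second row at least as long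
-- (otherwise A raises IndexError on result[0]/result[1] or on values[1][i])
def Pre_solve (values : List (List Int)) : Prop :=
  2 ≤ values.length ∧ 2 ≤ (values.getD 0 []).length ∧ (values.getD 0 []).length ≤ (values.getD 1 []).length
instance (values : List (List Int)) : Decidable (Pre_solve values) := by unfold Pre_solve; infer_instance
def pvWitness_solve : List (List Int) := [[1, 5, 3], [2, 0, 7]]

def Spec_solve (values : List (List Int)) (out : Int) : Prop := out = solve_alt values
instance (values : List (List Int)) (out : Int) : Decidable (Spec_solve values out) := by unfold Spec_solve; infer_instance

-- ===== CLAIM (what is proved, stated in full; the proofs are below) =====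
def Claim_equal_solve : Prop := ∀ (values : List (List Int)), Dom_solve values → Pre_solve values → Spec_solve values (solve values)

-- ===== LEMMAS AND PROOFS =====

theorem loop_inv (row0 row1 : List Int) (k : Nat) (hk : k + 2 ≤ row0.length) :
    ((PySem.List.pyRange 2 ((k : Int) + 2) 1).foldl (stepA row0 row1)
        (((List.replicate row0.length (0:Int)).set 0 (bestB row0 row1 0)).set 1 (bestB row0 row1 1))).length
      = row0.length ∧
    ∀ i < k + 2,
      ((PySem.List.pyRange 2 ((k : Int) + 2) 1).foldl (stepA row0 row1)
        (((List.replicate row0.length (0:Int)).set 0 (bestB row0 row1 0)).set 1 (bestB row0 row1 1))).getD i 0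
      = bestB row0 row1 i := by
  induction k with
  | zero =>
    rw [PySem.List.pyRange_one_eq_nil (by norm_num)]
    refine ⟨by simp, ?_⟩
    intro i hi
    interval_cases i
    · rw [List.foldl_nil, List.getD_eq_getElem?_getD, List.getElem?_set_ne (by omega),
        List.getElem?_set_self (by simp only [List.length_replicate]; omega)]
      rfl
    · rw [List.foldl_nil, List.getD_eq_getElem?_getD,
        List.getElem?_set_self (by simp only [List.length_set, List.length_replicate]; omega)]
      rfl
  | succ k ih =>
    have hk' : k + 2 ≤ row0.length := by omega
    obtain ⟨ihlen, ihval⟩ := ih hk'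
    push_cast
    have hsplit : PySem.List.pyRange 2 ((k : Int) + 1 + 2) 1
        = PySem.List.pyRange 2 ((k : Int) + 2) 1 ++ [(k : Int) + 2] := by
      have := PySem.List.pyRange_one_succ_right (a := 2) (b := (k : Int) + 2) (by omega)
      rw [show (k : Int) + 1 + 2 = ((k : Int) + 2) + 1 by ring, this]
    rw [hsplit, List.foldl_append]
    set L := (PySem.List.pyRange 2 ((k : Int) + 2) 1).foldl (stepA row0 row1)
      (((List.replicate row0.length (0:Int)).set 0 (bestB row0 row1 0)).set 1 (bestB row0 row1 1)) with hL
    have hj : ((k : Int) + 2).toNat = k + 2 := by omega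
    have hstep : List.foldl (stepA row0 row1) L [(k : Int) + 2]
        = L.set (k + 2) (bestB row0 row1 (k + 2)) := by
      simp only [List.foldl_cons, List.foldl_nil, stepA, hj]
      have h1 : L.getD (k + 2 - 1) 0 = bestB row0 row1 (k + 1) := by
        have := ihval (k + 1) (by omega); simpa using this
      have h0 : L.getD (k + 2 - 2) 0 = bestB row0 row1 k := by
        have := ihval k (by omega); simpa using this
      rw [show k + 2 - 1 = k + 1 by omega, show k + 2 - 2 = k by omega] at *
      rw [h1, h0]
      rfl
    rw [hstep]
    refine ⟨by simp [ihlen], ?_⟩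
    intro i hi
    by_cases hieq : i = k + 2
    · subst hieq
      rw [List.getD_eq_getElem?_getD, List.getElem?_set_self (by omega)]
      rfl
    · rw [List.getD_eq_getElem?_getD, List.getElem?_set_ne (by omega),
        ← List.getD_eq_getElem?_getD]
      exact ihval i (by omega)

-- ===== VERDICT (by name: the statement is the Claim_ definition above) =====
theorem solve_spec : Claim_equal_solve := by
  intro values _ hpre
  obtain ⟨hlen, hcols, hrow1⟩ := hpre
  unfold Spec_solve solve solve_alt
  set row0 := values.getD 0 [] with hr0
  set row1 := values.getD 1 [] with hr1
  simp only []
  obtain ⟨k, hk⟩ : ∃ k, row0.length = k + 2 := ⟨row0.length - 2, by omega⟩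
  have hinit : (((List.replicate row0.length (0:Int)).set 0 (|row0.getD 0 0 - row1.getD 0 0|)).set 1 (max (|row0.getD 0 0 - row1.getD 0 0| + |row0.getD 1 0 - row1.getD 1 0|) (|row0.getD 0 0 - row0.getD 1 0| + |row1.getD 0 0 - row1.getD 1 0|))) = ((List.replicate row0.length (0:Int)).set 0 (bestB row0 row1 0)).set 1 (bestB row0 row1 1) := rfl
  rw [hinit]
  have hinv := loop_inv row0 row1 k (by omega)
  have hb := hinv.2 (k + 1) (by omega)
  rw [hk]
  have hcast : ((k + 2 : Nat) : Int) = (k : Int) + 2 := by push_cast; ring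
  rw [hcast, show k + 2 - 1 = k + 1 by omega, ← hk]
  exact hb
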